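-- pv_equiv track=rewrite | github.com/Wasroy/Projet_FMPAD | calcul_paires.py | calculer_differences_approbations
-- ===== SOURCE A (Python) =====
-- def calculer_differences_approbations(profil):
--     """
--     profil: liste de n bulletins de votes par oui/non
--     chaque bulletin est une liste de m valeurs binaires 0:vote pas et 1: vote pour
--
--     RETURN: liste de toutes les valeurs dckcl(p) pour toutes les paires de candidates
--     """
--
--
--     #petite verif
--     if len(profil)==0 :
--         raise ValueError("erreur aucune votantes")
--
--     if len(profil[0])==0 :
--         raise ValueError("erreur aucune candidates")
--
--
--     m = len(profil[0]) #nb de candidates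
--
--     #liste pour stocker toutes les differences
--     differences = []
--
--     #parcourir toutes les tuples de candidates "(k,l)", on impose aussi k < l pour eviter les doublons.
--     for k in range(m):
--
--         for l in range(k+1, m):
--
--             #compter combien de votantes preferent candidate k a candidate l
--             #une votante prefere k a l si elle approuve k par 1 et n'approuve pas l par 0
--
--             nb_k_prefere_l = 0
--
--             for bulletin in profil:
--
--                 if (bulletin[k] == 1) and (bulletin[l] == 0):
--
--                     nb_k_prefere_l += 1
--
--             #idem dans l'autre sens
--             nb_l_prefere_k = 0
--
--             for bulletin in profil:
--                 if (bulletin[l] == 1) and (bulletin[k] == 0):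
--                     nb_l_prefere_k += 1
--
--
--
--             #calculer la difference absolue, on aurait pu utiliser le module math avec abs mais c'est encore plus explicit comme ça
--             if nb_k_prefere_l > nb_l_prefere_k:
--
--                 difference = nb_k_prefere_l - nb_l_prefere_k
--
--             else:
--
--                 difference = nb_l_prefere_k - nb_k_prefere_l
--
--             differences.append(difference)
--
--     return differences
-- ===== SOURCE B (Python) =====
-- def calculer_differences_approbations(profil):
--     if len(profil) == 0:
--         raise ValueError("erreur aucune votantes")
--     m = len(profil[0])
--     if m == 0:
--         raise ValueError("erreur aucune candidates")
--
--     def signe(bulletin, k, l):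
--         # +1 if this voter prefers k to l, -1 if l to k, 0 otherwise
--         if bulletin[k] == 1 and bulletin[l] == 0:
--             return 1
--         if bulletin[l] == 1 and bulletin[k] == 0:
--             return -1
--         return 0
--
--     paires = [(k, l) for k in range(m) for l in range(k + 1, m)]
--     net = [0] * len(paires)
--     for bulletin in profil:
--         net = [n + signe(bulletin, k, l) for n, (k, l) in zip(net, paires)]
--     return [abs(n) for n in net]
-- ===== Notes on version B (the rewrite author's own statement) =====
-- stated objective: alternative
-- what changed: Loop interchange: instead of A's pair-major double counting passes over all bulletins per candidate pair, B makes one bulletin-major pass accumulating a single signed net preference per pair and takes absolute values at the end.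
import Mathlib
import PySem

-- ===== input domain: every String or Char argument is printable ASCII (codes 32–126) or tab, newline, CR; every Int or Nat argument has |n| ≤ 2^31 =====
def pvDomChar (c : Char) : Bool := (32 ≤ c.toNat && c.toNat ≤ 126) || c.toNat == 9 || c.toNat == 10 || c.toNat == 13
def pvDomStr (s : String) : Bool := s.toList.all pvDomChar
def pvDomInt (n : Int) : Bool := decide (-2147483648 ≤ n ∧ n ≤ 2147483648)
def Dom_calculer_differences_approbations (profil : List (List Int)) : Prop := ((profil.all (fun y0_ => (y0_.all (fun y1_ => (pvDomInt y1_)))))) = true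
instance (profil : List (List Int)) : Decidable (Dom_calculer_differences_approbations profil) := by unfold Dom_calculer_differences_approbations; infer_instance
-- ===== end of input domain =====

-- B changes the traversal (bulletin-major signed net per pair, abs at the end) instead of A's
-- pair-major double counting; objective: alternative (same asymptotic cost).

-- ===== PORT A =====
def calculer_differences_approbations (profil : List (List Int)) : List Int :=
  if profil.length = 0 then []            -- Python: raise ValueError (excluded by Pre_)
  else if (profil.headD []).length = 0 then []   -- Python: raise ValueError (excluded by Pre_)
  else
    let m : Int := (profil.headD []).length
    (PySem.List.pyRange 0 m 1).foldl (fun differences k =>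
      (PySem.List.pyRange (k+1) m 1).foldl (fun differences l =>
        let nb_k_prefere_l : Int := profil.foldl (fun nb bulletin =>
          if PySem.List.pyGetD bulletin k 0 = 1 ∧ PySem.List.pyGetD bulletin l 0 = 0
          then nb + 1 else nb) 0
        let nb_l_prefere_k : Int := profil.foldl (fun nb bulletin =>
          if PySem.List.pyGetD bulletin l 0 = 1 ∧ PySem.List.pyGetD bulletin k 0 = 0
          then nb + 1 else nb) 0
        let difference : Int :=
          if nb_k_prefere_l > nb_l_prefere_k then nb_k_prefere_l - nb_l_prefere_k
          else nb_l_prefere_k - nb_k_prefere_l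
        differences ++ [difference]) differences) []

-- ===== PORT B =====
def pvSigne (bulletin : List Int) (k l : Int) : Int :=
  if PySem.List.pyGetD bulletin k 0 = 1 ∧ PySem.List.pyGetD bulletin l 0 = 0 then 1
  else if PySem.List.pyGetD bulletin l 0 = 1 ∧ PySem.List.pyGetD bulletin k 0 = 0 then -1
  else 0

def calculer_differences_approbations_alt (profil : List (List Int)) : List Int :=
  if profil.length = 0 then []            -- Python: raise ValueError (excluded by Pre_)
  else
    let m : Int := (profil.headD []).length
    if m = 0 then []                       -- Python: raise ValueError (excluded by Pre_)
    else
      let paires : List (Int × Int) :=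
        (PySem.List.pyRange 0 m 1).flatMap (fun k =>
          (PySem.List.pyRange (k+1) m 1).map (fun l => (k, l)))
      let net : List Int := profil.foldl (fun net bulletin =>
        (net.zip paires).map (fun np => np.1 + pvSigne bulletin np.2.1 np.2.2))
        (List.replicate paires.length 0)
      net.map (fun n => |n|)

-- ===== PRECONDITION & SPEC =====
-- Pre_ excludes exactly the inputs where Python A raises: empty profile, empty first bulletin,
-- or (when there are at least two candidates) some bulletin shorter than the first one.
def Pre_calculer_differences_approbations (profil : List (List Int)) : Prop :=
  profil ≠ [] ∧ (profil.headD []) ≠ [] ∧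
    ((profil.headD []).length = 1 ∨ ∀ b ∈ profil, (profil.headD []).length ≤ b.length)
instance (profil : List (List Int)) : Decidable (Pre_calculer_differences_approbations profil) := by
  unfold Pre_calculer_differences_approbations; infer_instance

def pvWitness_calculer_differences_approbations : List (List Int) := [[1, 0, 1], [0, 1, 1]]

def Spec_calculer_differences_approbations (profil : List (List Int)) (out : List Int) : Prop := out = calculer_differences_approbations_alt profil
instance (profil : List (List Int)) (out : List Int) : Decidable (Spec_calculer_differences_approbations profil out) := by unfold Spec_calculer_differences_approbations; infer_instance

-- ===== CLAIM (what is proved, stated in full; the proofs are below) =====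
def Claim_equal_calculer_differences_approbations : Prop := ∀ (profil : List (List Int)), Dom_calculer_differences_approbations profil → Pre_calculer_differences_approbations profil → Spec_calculer_differences_approbations profil (calculer_differences_approbations profil)

-- ===== LEMMAS AND PROOFS =====

-- per-voter: the two counting tests combine into the signed term
theorem pvSigne_eq (b : List Int) (k l : Int) :
    pvSigne b k l =
      (if PySem.List.pyGetD b k 0 = 1 ∧ PySem.List.pyGetD b l 0 = 0 then (1:Int) else 0)
      - (if PySem.List.pyGetD b l 0 = 1 ∧ PySem.List.pyGetD b k 0 = 0 then (1:Int) else 0) := by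
  unfold pvSigne
  split_ifs with h1 h2 h3 <;> omega

-- A's two counters per pair differ by exactly the signed sum B accumulates
theorem pv_count_sub (k l : Int) (profil : List (List Int)) : ∀ (a c : Int),
    profil.foldl (fun nb b =>
        if PySem.List.pyGetD b k 0 = 1 ∧ PySem.List.pyGetD b l 0 = 0 then nb + 1 else nb) a
      - profil.foldl (fun nb b =>
        if PySem.List.pyGetD b l 0 = 1 ∧ PySem.List.pyGetD b k 0 = 0 then nb + 1 else nb) c
    = a - c + (profil.map (fun b => pvSigne b k l)).sum := by
  induction profil with
  | nil => intro a c; simp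
  | cons b bs ih =>
    intro a c
    simp only [List.foldl_cons, List.map_cons, List.sum_cons]
    rw [ih]
    rw [pvSigne_eq]
    split_ifs <;> ring
  
theorem pv_zip_map_zip {α β : Type} (f : α × β → α) (xs : List α) (ys : List β)
    (h : xs.length = ys.length) :
    ((xs.zip ys).map f).zip ys = (xs.zip ys).map (fun p => (f p, p.2)) := by
  induction xs generalizing ys with
  | nil => simp
  | cons x xs ih =>
    cases ys with
    | nil => simp at h
    | cons y ys => simp_all

-- B's accumulation loop computes, for each pair, the signed sum over the bulletins
theorem pv_net_loop (profil : List (List Int)) (paires : List (Int × Int))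
    (init : List Int) (h : init.length = paires.length) :
    profil.foldl (fun net bulletin =>
        (net.zip paires).map (fun np => np.1 + pvSigne bulletin np.2.1 np.2.2)) init
    = (init.zip paires).map (fun np =>
        np.1 + (profil.map (fun b => pvSigne b np.2.1 np.2.2)).sum) := by
  induction profil generalizing init with
  | nil =>
    simp only [List.foldl_nil, List.map_nil, List.sum_nil, add_zero]
    exact (List.map_fst_zip h.le).symm
  | cons b bs ih =>
    simp only [List.foldl_cons, List.map_cons, List.sum_cons]
    rw [ih _ (by simp [h])]
    rw [pv_zip_map_zip _ _ _ (by simp [h])]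
    simp only [List.map_map]
    apply List.map_congr_left
    intro p _
    simp only [Function.comp]
    ring

theorem pv_zip_replicate {β : Type} (a : Int) (l : List β) :
    (List.replicate l.length a).zip l = l.map (fun x => (a, x)) := by
  induction l with
  | nil => simp
  | cons x xs ih => simp [List.replicate_succ, ih]

-- A's nested append-loops produce the map over the flattened pair list
theorem pv_A_eq (profil : List (List Int)) (h0 : profil.length ≠ 0)
    (h1 : (profil.headD []).length ≠ 0) :
    calculer_differences_approbations profil =
      ((PySem.List.pyRange 0 ((profil.headD []).length : Int) 1).flatMap (fun k =>
        (PySem.List.pyRange (k+1) ((profil.headD []).length : Int) 1).map (fun l => (k, l)))).map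
        (fun p =>
          let c1 : Int := profil.foldl (fun nb b =>
            if PySem.List.pyGetD b p.1 0 = 1 ∧ PySem.List.pyGetD b p.2 0 = 0
            then nb + 1 else nb) 0
          let c2 : Int := profil.foldl (fun nb b =>
            if PySem.List.pyGetD b p.2 0 = 1 ∧ PySem.List.pyGetD b p.1 0 = 0
            then nb + 1 else nb) 0
          if c1 > c2 then c1 - c2 else c2 - c1) := by
  unfold calculer_differences_approbations
  rw [if_neg h0, if_neg h1]
  simp only [PySem.List.foldl_append_singleton_eq_map,
    PySem.List.foldl_append_eq_flatMap, List.nil_append, List.map_flatMap, List.map_map]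
  rfl

-- ===== VERDICT (by name: the statement is the Claim_ definition above) =====
theorem calculer_differences_approbations_spec : Claim_equal_calculer_differences_approbations := by
  intro profil _ _
  unfold Spec_calculer_differences_approbations
  by_cases h0 : profil.length = 0
  · unfold calculer_differences_approbations calculer_differences_approbations_alt
    rw [if_pos h0, if_pos h0]
  by_cases h1 : (profil.headD []).length = 0
  · unfold calculer_differences_approbations calculer_differences_approbations_alt
    rw [if_neg h0, if_pos h1, if_neg h0]
    simp only []
    rw [if_pos (by exact_mod_cast h1)]
  · rw [pv_A_eq profil h0 h1]
    unfold calculer_differences_approbations_alt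
    rw [if_neg h0]
    simp only []
    rw [if_neg (by exact_mod_cast h1)]
    rw [pv_net_loop _ _ _ (by simp), pv_zip_replicate]
    simp only [List.map_map]
    apply List.map_congr_left
    intro p _
    simp only [Function.comp]
    rw [zero_add]
    rw [show ((profil.map (fun b => pvSigne b p.1 p.2)).sum : Int)
        = profil.foldl (fun nb b => if PySem.List.pyGetD b p.1 0 = 1 ∧ PySem.List.pyGetD b p.2 0 = 0 then nb + 1 else nb) 0
          - profil.foldl (fun nb b => if PySem.List.pyGetD b p.2 0 = 1 ∧ PySem.List.pyGetD b p.1 0 = 0 then nb + 1 else nb) 0 from by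
      rw [pv_count_sub p.1 p.2 profil 0 0]; ring]
    have habs : ∀ x y : Int, (if x > y then x - y else y - x) = |x - y| := by
      intro x y
      rcases lt_or_ge y x with h | h
      · rw [if_pos (by omega), abs_of_pos (by omega)]
      · rw [if_neg (by omega), abs_of_nonpos (by omega)]; ring
    simp only [habs]
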